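-- pv_equiv track=rewrite | github.com/Oluwateezzy/data_structure | problem23.py | count_concecutive_occurrence
-- ===== SOURCE A (Python) =====
-- def count_concecutive_occurrence(lis:[], k:int):
--     count = 0
--     max_count = 0
--
--     for i in range(len(lis)):
--         if lis[i] == 0:
--             count += 1
--             if count == k:
--                 return i - k + 1
--         else:
--             count = 0
--     return -1
-- ===== SOURCE B (Python) =====
-- def count_concecutive_occurrence(lis: [], k: int):
--     # Run-based scan: find the start of the first maximal run of zeros of length >= k.
--     if k <= 0:
--         return -1
--     n = len(lis)
--     i = 0
--     while i < n:
--         if lis[i] == 0: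
--             j = i
--             while j < n and lis[j] == 0:
--                 j += 1
--             if j - i >= k:
--                 return i
--             i = j
--         else:
--             i += 1
--     return -1
-- ===== Notes on version B (the rewrite author's own statement) =====
-- stated objective: alternative
-- what changed: Replaces A's per-element zero counter (returning i-k+1 when the counter hits k) with a run-based scan that skips over each maximal zero run at once and returns the run's start index when its length is >= k, with an explicit k <= 0 guard returning -1.
import Mathlib
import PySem

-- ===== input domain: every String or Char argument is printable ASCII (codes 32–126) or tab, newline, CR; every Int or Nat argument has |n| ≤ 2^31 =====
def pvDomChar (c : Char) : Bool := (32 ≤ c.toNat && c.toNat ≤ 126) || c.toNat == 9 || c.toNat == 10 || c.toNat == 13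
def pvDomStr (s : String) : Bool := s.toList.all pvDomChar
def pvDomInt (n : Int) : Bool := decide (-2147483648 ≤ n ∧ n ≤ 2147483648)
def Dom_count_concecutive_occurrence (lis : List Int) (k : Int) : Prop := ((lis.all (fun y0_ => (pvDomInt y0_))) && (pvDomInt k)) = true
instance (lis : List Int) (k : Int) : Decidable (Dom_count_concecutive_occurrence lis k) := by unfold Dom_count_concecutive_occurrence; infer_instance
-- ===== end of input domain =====

-- B replaces A's per-element zero counter with a run-based scan that skips each
-- maximal zero run at once (alternative decomposition, same O(n) cost).


-- ===== PORT A =====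
-- A's for-loop over indices, carrying the running zero counter `c`
-- (A's `max_count` variable is dead code and is not carried).
def pvLoopA (k : Int) : List Int → Int → Int → Int
  | [], _, _ => -1
  | x :: xs, i, c =>
    if x = 0 then
      (if c + 1 = k then i - k + 1 else pvLoopA k xs (i + 1) (c + 1))
    else
      pvLoopA k xs (i + 1) 0

def count_concecutive_occurrence (lis : List Int) (k : Int) : Int :=
  pvLoopA k lis 0 0

-- ===== PORT B =====
-- inner while loop of Source B: length of the leading run of zeros
def pvRunLen : List Int → Nat
  | [] => 0
  | x :: xs => if x = 0 then pvRunLen xs + 1 else 0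

-- outer while loop of Source B: scan, skipping each maximal zero run at once
def pvLoopB (k : Int) : List Int → Int → Int
  | [], _ => -1
  | x :: xs, i =>
    if h : x = 0 then
      let z : Nat := pvRunLen (x :: xs)
      if (z : Int) ≥ k then i else pvLoopB k (List.drop z (x :: xs)) (i + z)
    else
      pvLoopB k xs (i + 1)
  termination_by l _ => l.length
  decreasing_by
  · simp [List.length_drop]
    have : 1 ≤ pvRunLen (x :: xs) := by simp [pvRunLen, h]
    omega
  · simp

def count_concecutive_occurrence_alt (lis : List Int) (k : Int) : Int :=
  if k ≤ 0 then -1 else pvLoopB k lis 0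

-- ===== PRECONDITION & SPEC =====
def Spec_count_concecutive_occurrence (lis : List Int) (k : Int) (out : Int) : Prop := out = count_concecutive_occurrence_alt lis k
instance (lis : List Int) (k : Int) (out : Int) : Decidable (Spec_count_concecutive_occurrence lis k out) := by unfold Spec_count_concecutive_occurrence; infer_instance

-- ===== CLAIM (what is proved, stated in full; the proofs are below) =====
def Claim_equal_count_concecutive_occurrence : Prop := ∀ (lis : List Int) (k : Int), Dom_count_concecutive_occurrence lis k → Spec_count_concecutive_occurrence lis k (count_concecutive_occurrence lis k)

-- ===== LEMMAS AND PROOFS =====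

-- With k ≤ 0 the counter check `c + 1 = k` can never fire (c stays ≥ 0), so A returns -1.
lemma pvLoopA_nonpos (k : Int) (hk : k ≤ 0) :
    ∀ (lis : List Int) (i c : Int), 0 ≤ c → pvLoopA k lis i c = -1 := by
  intro lis
  induction lis with
  | nil => intro i c _; simp [pvLoopA]
  | cons x xs ih =>
    intro i c hc
    simp only [pvLoopA]
    split_ifs with hx hck
    · omega
    · exact ih (i + 1) (c + 1) (by omega)
    · exact ih (i + 1) 0 le_rfl

-- Joint invariant, for k > 0:
-- (1) with counter 0, A's loop equals B's loop;
-- (2) mid-run with counter 0 < c < k, A's loop finishes the current leading zero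
--     run: it returns the run start i - c if the run completes k zeros, else
--     resumes as B's loop after the run.
lemma pvLoopAB (k : Int) (hk : 0 < k) :
    ∀ lis : List Int,
      (∀ i : Int, pvLoopA k lis i 0 = pvLoopB k lis i) ∧
      (∀ i c : Int, 0 < c → c < k →
        pvLoopA k lis i c =
          if c + (pvRunLen lis : Int) ≥ k then i - c
          else pvLoopB k (List.drop (pvRunLen lis) lis) (i + (pvRunLen lis : Int))) := by
  intro lis
  induction lis with
  | nil =>
    constructor
    · intro i; simp [pvLoopA, pvLoopB]
    · intro i c hc hck
      simp [pvLoopA, pvLoopB, pvRunLen]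
      omega
  | cons x xs ih =>
    obtain ⟨ihG, ihR⟩ := ih
    constructor
    · intro i
      by_cases hx : x = 0
      · subst hx
        rw [pvLoopB]
        have hz : pvRunLen ((0 : Int) :: xs) = pvRunLen xs + 1 := by simp [pvRunLen]
        rw [hz]
        simp only [pvLoopA, List.drop_succ_cons, if_true, dite_true, zero_add]
        by_cases h1 : (1 : Int) = k
        · rw [if_pos h1]
          rw [if_pos (by push_cast; omega)]
          omega
        · rw [if_neg h1]
          rw [ihR (i + 1) 1 one_pos (by omega)]
          have hcond : ((1 : Int) + (pvRunLen xs : Int) ≥ k) ↔ (((pvRunLen xs + 1 : Nat) : Int) ≥ k) := by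
            push_cast; omega
          by_cases hge : (1 : Int) + (pvRunLen xs : Int) ≥ k
          · rw [if_pos hge, if_pos (hcond.mp hge)]; omega
          · rw [if_neg hge, if_neg (fun h => hge (hcond.mpr h))]
            congr 1
            push_cast; omega
      · rw [pvLoopB]
        simp only [dif_neg hx]
        simp only [pvLoopA, if_neg hx]
        exact ihG (i + 1)
    · intro i c hc hck
      by_cases hx : x = 0
      · subst hx
        have hz : pvRunLen ((0 : Int) :: xs) = pvRunLen xs + 1 := by simp [pvRunLen]
        rw [hz]
        simp only [pvLoopA, List.drop_succ_cons, if_true]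
        by_cases hck1 : c + 1 = k
        · rw [if_pos hck1, if_pos (by push_cast; omega)]
          omega
        · rw [if_neg hck1]
          rw [ihR (i + 1) (c + 1) (by omega) (by omega)]
          have hcond : (c + 1 + (pvRunLen xs : Int) ≥ k) ↔ (c + ((pvRunLen xs + 1 : Nat) : Int) ≥ k) := by
            push_cast; omega
          by_cases hge : c + 1 + (pvRunLen xs : Int) ≥ k
          · rw [if_pos hge, if_pos (hcond.mp hge)]; omega
          · rw [if_neg hge, if_neg (fun h => hge (hcond.mpr h))]
            congr 1
            push_cast; omega
      · have hz : pvRunLen (x :: xs) = 0 := by simp [pvRunLen, hx]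
        rw [hz]
        simp only [pvLoopA, if_neg hx]
        rw [if_neg (by push_cast; omega)]
        simp only [List.drop_zero, Int.natCast_zero, add_zero]
        rw [pvLoopB]
        simp only [dif_neg hx]
        exact ihG (i + 1)

-- ===== VERDICT (by name: the statement is the Claim_ definition above) =====
theorem count_concecutive_occurrence_spec : Claim_equal_count_concecutive_occurrence := by
  intro lis k _
  unfold Spec_count_concecutive_occurrence count_concecutive_occurrence count_concecutive_occurrence_alt
  by_cases hk : k ≤ 0
  · rw [if_pos hk]
    exact pvLoopA_nonpos k hk lis 0 0 le_rfl
  · rw [if_neg hk]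
    exact (pvLoopAB k (by omega) lis).1 0
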